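-- pv_equiv track=rewrite | github.com/acatherinebusinessintelligence/senado-rag-dashboard | app_pl_rag_dashboard.py | _strip_weird_img_suffix
-- ===== SOURCE A (Python) =====
-- IMG_EXTS = {".jpg", ".jpeg", ".png", ".webp"}
--
-- def _strip_weird_img_suffix(filename: str) -> str:
--     """
--     Maneja casos tipo: Alex_Xavier_Fl_rez_Hern_ndezjpg  (sin punto antes de jpg)
--     y también nombres normales con extensión.
--     Retorna "base name" sin extensión real o pegada.
--     """
--     name = filename.strip()
--
--     low = name.lower()
--
--     # Caso normal: tiene extensión válida
--     for ext in IMG_EXTS: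
--         if low.endswith(ext):
--             return name[: -len(ext)]
--
--     # Caso raro: termina en "jpg/jpeg/png/webp" sin el punto
--     for ext in ["jpg", "jpeg", "png", "webp"]:
--         if low.endswith(ext) and not low.endswith("." + ext):
--             return name[: -len(ext)]
--
--     # Si no detecta nada, devuelve tal cual
--     return name
-- ===== SOURCE B (Python) =====
-- def _strip_weird_img_suffix(filename: str) -> str:
--     # Table keyed by suffix length: check the last-4 and last-3 characters against
--     # the extensions of that length, then cut the extension plus an optional dot.
--     name = filename.strip()
--     low = name.lower()
--     for k, exts in ((4, ("jpeg", "webp")), (3, ("jpg", "png"))):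
--         if low[len(low) - k:] in exts:
--             cut = k + low[: len(low) - k].endswith(".")
--             return name[: len(name) - cut]
--     return name
-- ===== Notes on version B (the rewrite author's own statement) =====
-- stated objective: alternative
-- what changed: Replaces A's two sequential endswith loops (dotted set, then undotted list) with a single length-indexed table lookup: the last 4 / last 3 characters are compared against the extensions of that length, and the optional preceding dot is handled arithmetically in one cut-length computation.
import Mathlib
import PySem

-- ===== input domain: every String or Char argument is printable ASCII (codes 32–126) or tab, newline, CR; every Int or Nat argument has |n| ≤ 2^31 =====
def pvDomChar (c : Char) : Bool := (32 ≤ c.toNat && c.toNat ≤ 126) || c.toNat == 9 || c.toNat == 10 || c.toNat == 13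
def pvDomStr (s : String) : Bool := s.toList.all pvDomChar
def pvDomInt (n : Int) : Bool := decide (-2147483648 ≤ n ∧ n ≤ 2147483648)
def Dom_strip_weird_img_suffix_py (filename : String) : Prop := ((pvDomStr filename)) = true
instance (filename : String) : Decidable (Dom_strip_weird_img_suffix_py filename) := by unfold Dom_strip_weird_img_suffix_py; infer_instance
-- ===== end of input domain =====

-- B replaces A's two sequential endswith loops by a single length-indexed table lookup
-- (last-4 / last-3 characters) with the optional dot handled arithmetically; same cost,
-- alternative structure; equivalence of RETURN values proved below.

-- ===== PORT A =====
-- IMG_EXTS is a Python set; its iteration order is ported in literal order (the proof does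
-- not depend on it: at most one dotted extension can match).
def pvLoopDotted (name low : String) : List String → Option String
  | [] => none
  | ext :: rest =>
    if PySem.Str.endswith low ext then
      some (PySem.Str.slice name none (some (-(PySem.Str.len ext))))
    else pvLoopDotted name low rest

def pvLoopBare (name low : String) : List String → Option String
  | [] => none
  | ext :: rest =>
    if PySem.Str.endswith low ext && !PySem.Str.endswith low ("." ++ ext) then
      some (PySem.Str.slice name none (some (-(PySem.Str.len ext))))
    else pvLoopBare name low rest

-- the two loops followed by the final `return name`, in A's order
def pvLoops (name low : String) : String :=
  match pvLoopDotted name low [".jpg", ".jpeg", ".png", ".webp"] with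
  | some r => r
  | none =>
    match pvLoopBare name low ["jpg", "jpeg", "png", "webp"] with
    | some r => r
    | none => name

def strip_weird_img_suffix_py (filename : String) : String :=
  let name := PySem.Str.strip filename
  let low := PySem.Str.lower name
  pvLoops name low

-- ===== PORT B =====
def pvAltLoop (name low : String) : List (Nat × List String) → String
  | [] => name
  | (k, exts) :: rest =>
    if PySem.Str.slice low (some (PySem.Str.len low - (k : Int))) none ∈ exts then
      let cut : Nat := k +
        (if PySem.Str.endswith (PySem.Str.slice low none (some (PySem.Str.len low - (k : Int)))) "." then 1 else 0)
      PySem.Str.slice name none (some (PySem.Str.len name - (cut : Int)))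
    else pvAltLoop name low rest

def strip_weird_img_suffix_py_alt (filename : String) : String :=
  let name := PySem.Str.strip filename
  let low := PySem.Str.lower name
  pvAltLoop name low [(4, ["jpeg", "webp"]), (3, ["jpg", "png"])]

-- ===== PRECONDITION & SPEC =====
def Spec_strip_weird_img_suffix_py (filename : String) (out : String) : Prop := out = strip_weird_img_suffix_py_alt filename
instance (filename : String) (out : String) : Decidable (Spec_strip_weird_img_suffix_py filename out) := by unfold Spec_strip_weird_img_suffix_py; infer_instance

-- ===== CLAIM (what is proved, stated in full; the proofs are below) =====
def Claim_equal_strip_weird_img_suffix_py : Prop := ∀ (filename : String), Dom_strip_weird_img_suffix_py filename → Spec_strip_weird_img_suffix_py filename (strip_weird_img_suffix_py filename)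

-- ===== LEMMAS AND PROOFS =====

lemma sfx_trans_dot {l e : List Char} (h : ('.' :: e) <:+ l) : e <:+ l :=
  List.IsSuffix.trans ⟨['.'], rfl⟩ h

lemma sfx_absurd {l e1 e2 : List Char} (h1 : e1 <:+ l) (h2 : e2 <:+ l)
    (hn1 : ¬ e1 <:+ e2) (hn2 : ¬ e2 <:+ e1) : False := by
  rcases List.suffix_or_suffix_of_suffix h1 h2 with h | h
  · exact hn1 h
  · exact hn2 h

lemma drop_eq_of_suffix {l e : List Char} (h : e <:+ l) :
    l.drop (l.length - e.length) = e := by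
  rcases h with ⟨p, rfl⟩
  have hp : (p ++ e).length - e.length = p.length := by simp
  rw [hp, List.drop_left]

lemma dot_iff {l e : List Char} (h : e <:+ l) :
    (['.'] <:+ l.take (l.length - e.length)) ↔ (('.' :: e) <:+ l) := by
  rcases h with ⟨p, rfl⟩
  have hp : (p ++ e).length - e.length = p.length := by simp
  rw [hp, List.take_left]
  constructor
  · rintro ⟨q, rfl⟩
    exact ⟨q, by simp⟩
  · rintro ⟨q, hq⟩
    have h2 : (q ++ ['.']) ++ e = p ++ e := by simpa using hq
    exact ⟨q, List.append_cancel_right h2⟩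

lemma ew_true {low e : String} (h : e.toList <:+ low.toList) :
    PySem.Str.endswith low e = true := by
  rw [PySem.Str.endswith_eq]; exact (PySem.Chars.endswith_iff _ _).mpr h

lemma ew_false {low e : String} (h : ¬ e.toList <:+ low.toList) :
    PySem.Str.endswith low e = false := by
  rw [PySem.Str.endswith_eq]
  exact Bool.eq_false_iff.mpr (fun hx => h ((PySem.Chars.endswith_iff _ _).mp hx))

lemma clamp_sub (n k : Nat) (h : k ≤ n) : PySem.List.clampIdx n ((n : Int) - (k : Int)) = n - k := by
  unfold PySem.List.clampIdx
  rw [if_neg (by omega)]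
  omega

lemma tail_eq_iff {low e : String} {k : Nat} (hk : e.toList.length = k) :
    (PySem.Str.slice low (some (PySem.Str.len low - (k : Int))) none = e) ↔ e.toList <:+ low.toList := by
  rw [← String.toList_inj, PySem.Str.toList_slice, PySem.Chars.slice_eq_listSlice,
      PySem.Str.len, PySem.List.slice_some_none]
  by_cases hn : k ≤ low.toList.length
  · rw [clamp_sub _ _ hn]
    constructor
    · intro h; exact h ▸ List.drop_suffix _ _
    · intro h; rw [← hk]; exact drop_eq_of_suffix h
  · constructor
    · intro h
      have hl := congrArg List.length h
      have hc := PySem.List.clampIdx_le low.toList.length ((low.toList.length : Int) - (k : Int))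
      rw [List.length_drop, hk] at hl
      omega
    · intro h
      have := h.length_le
      omega

lemma dotcond_iff {low e : String} {k : Nat} (hk : e.toList.length = k)
    (h : e.toList <:+ low.toList) :
    (PySem.Str.endswith (PySem.Str.slice low none (some (PySem.Str.len low - (k : Int)))) "." = true)
    ↔ (('.' :: e.toList) <:+ low.toList) := by
  have hkn : k ≤ low.toList.length := hk ▸ h.length_le
  rw [PySem.Str.endswith_eq, PySem.Str.toList_slice, PySem.Chars.slice_eq_listSlice,
      PySem.Str.len, PySem.List.slice_to _ (by omega : (0:Int) ≤ (low.toList.length : Int) - (k : Int))]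
  have ht : (((low.toList.length : Int)) - (k : Int)).toNat = low.toList.length - k := by omega
  rw [ht, PySem.Chars.endswith_iff]
  show (['.'] <:+ _) ↔ _
  rw [← hk]
  exact dot_iff h

lemma out_eq (name : String) (k : Nat) (hpos : 0 < k) (hk : k ≤ name.toList.length)
    (a b : Int) (ha : a = -(k : Int)) (hb : b = PySem.Str.len name - (k : Int)) :
    PySem.Str.slice name none (some a) = PySem.Str.slice name none (some b) := by
  subst ha; subst hb
  apply String.toList_inj.mp
  rw [PySem.Str.toList_slice, PySem.Str.toList_slice, PySem.Chars.slice_eq_listSlice,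
      PySem.Chars.slice_eq_listSlice, PySem.List.slice_to_neg_natCast _ _ hpos,
      PySem.Str.len, PySem.List.slice_to _ (by omega : (0:Int) ≤ (name.toList.length : Int) - (k : Int))]
  congr 1
  omega

lemma mem2_of {t a b : String} (h : t = a) : t ∈ [a, b] := by rw [h]; exact List.mem_cons_self
lemma mem2_of' {t a b : String} (h : t = b) : t ∈ [a, b] := by rw [h]; simp

lemma notmem2 {t a b : String} (ha : t ≠ a) (hb : t ≠ b) : t ∉ [a, b] := by
  intro hm
  rcases List.mem_cons.mp hm with h | hm'
  · exact ha h
  · rcases List.mem_cons.mp hm' with h | h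
    · exact hb h
    · simp at h

lemma main_eq (name low : String) (hlen : low.toList.length = name.toList.length) :
    pvLoops name low = pvAltLoop name low [(4, ["jpeg", "webp"]), (3, ["jpg", "png"])] := by
  have capp1 : ("." ++ "jpg" : String) = ".jpg" := rfl
  have capp2 : ("." ++ "jpeg" : String) = ".jpeg" := rfl
  have capp3 : ("." ++ "png" : String) = ".png" := rfl
  have capp4 : ("." ++ "webp" : String) = ".webp" := rfl
  by_cases hJ : ("jpg" : String).toList <:+ low.toList
  · -- "jpg" is a suffix; every other bare (hence dotted) extension is excluded
    have hE : ¬ ("jpeg" : String).toList <:+ low.toList :=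
      fun h => sfx_absurd hJ h (by decide) (by decide)
    have hP : ¬ ("png" : String).toList <:+ low.toList :=
      fun h => sfx_absurd hJ h (by decide) (by decide)
    have hW : ¬ ("webp" : String).toList <:+ low.toList :=
      fun h => sfx_absurd hJ h (by decide) (by decide)
    have hDE : ¬ (".jpeg" : String).toList <:+ low.toList := fun h => hE (sfx_trans_dot h)
    have hDP : ¬ (".png" : String).toList <:+ low.toList := fun h => hP (sfx_trans_dot h)
    have hDW : ¬ (".webp" : String).toList <:+ low.toList := fun h => hW (sfx_trans_dot h)
    have hm4 : PySem.Str.slice low (some (PySem.Str.len low - ((4:Nat) : Int))) none ∉ ["jpeg", "webp"] :=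
      notmem2 (fun h => hE ((tail_eq_iff (by decide)).mp h))
              (fun h => hW ((tail_eq_iff (by decide)).mp h))
    have hm3 : PySem.Str.slice low (some (PySem.Str.len low - ((3:Nat) : Int))) none ∈ ["jpg", "png"] :=
      mem2_of ((tail_eq_iff (by decide)).mpr hJ)
    have hk3 : 3 ≤ name.toList.length := by
      have h1 := hJ.length_le
      have h2 : ("jpg" : String).toList.length = 3 := by decide
      omega
    by_cases hD : (".jpg" : String).toList <:+ low.toList
    · have hdc : PySem.Str.endswith (PySem.Str.slice low none (some (PySem.Str.len low - ((3:Nat) : Int)))) "." = true :=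
        (dotcond_iff (by decide) hJ).mpr hD
      have hk4 : 4 ≤ name.toList.length := by
        have h1 := hD.length_le
        have h2 : (".jpg" : String).toList.length = 4 := by decide
        omega
      simp only [pvLoops, pvLoopDotted, ew_true hD, if_true]
      simp only [pvAltLoop, if_neg hm4, if_pos hm3, hdc, if_true]
      exact out_eq name 4 (by omega) hk4 _ _ (by decide) (by norm_num)
    · have hdc : PySem.Str.endswith (PySem.Str.slice low none (some (PySem.Str.len low - ((3:Nat) : Int)))) "." = false :=
        Bool.eq_false_iff.mpr (fun hx => hD ((dotcond_iff (by decide) hJ).mp hx))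
      simp only [pvLoops, pvLoopDotted, pvLoopBare, ew_false hD, ew_false hDE, ew_false hDP,
        ew_false hDW, capp1, ew_true hJ, Bool.not_false, Bool.and_self, if_true]
      simp only [pvAltLoop, if_neg hm4, if_pos hm3, hdc]
      exact out_eq name 3 (by omega) hk3 _ _ (by decide) (by norm_num)
  · by_cases hE : ("jpeg" : String).toList <:+ low.toList
    · have hP : ¬ ("png" : String).toList <:+ low.toList :=
        fun h => sfx_absurd hE h (by decide) (by decide)
      have hW : ¬ ("webp" : String).toList <:+ low.toList :=
        fun h => sfx_absurd hE h (by decide) (by decide)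
      have hDJ : ¬ (".jpg" : String).toList <:+ low.toList := fun h => hJ (sfx_trans_dot h)
      have hDP : ¬ (".png" : String).toList <:+ low.toList := fun h => hP (sfx_trans_dot h)
      have hDW : ¬ (".webp" : String).toList <:+ low.toList := fun h => hW (sfx_trans_dot h)
      have hm4 : PySem.Str.slice low (some (PySem.Str.len low - ((4:Nat) : Int))) none ∈ ["jpeg", "webp"] :=
        mem2_of ((tail_eq_iff (by decide)).mpr hE)
      have hk4 : 4 ≤ name.toList.length := by
        have h1 := hE.length_le
        have h2 : ("jpeg" : String).toList.length = 4 := by decide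
        omega
      by_cases hD : (".jpeg" : String).toList <:+ low.toList
      · have hdc : PySem.Str.endswith (PySem.Str.slice low none (some (PySem.Str.len low - ((4:Nat) : Int)))) "." = true :=
          (dotcond_iff (by decide) hE).mpr hD
        have hk5 : 5 ≤ name.toList.length := by
          have h1 := hD.length_le
          have h2 : (".jpeg" : String).toList.length = 5 := by decide
          omega
        simp only [pvLoops, pvLoopDotted, ew_true hD, ew_false hDJ, if_true]
        simp only [pvAltLoop, if_pos hm4, hdc, if_true]
        exact out_eq name 5 (by omega) hk5 _ _ (by decide) (by norm_num)
      · have hdc : PySem.Str.endswith (PySem.Str.slice low none (some (PySem.Str.len low - ((4:Nat) : Int)))) "." = false :=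
          Bool.eq_false_iff.mpr (fun hx => hD ((dotcond_iff (by decide) hE).mp hx))
        simp only [pvLoops, pvLoopDotted, pvLoopBare, ew_false hD, ew_false hDJ, ew_false hDP,
          ew_false hDW, ew_false hJ, capp2, ew_true hE, Bool.not_false, Bool.false_and,
          Bool.and_self, if_true]
        simp only [pvAltLoop, if_pos hm4, hdc]
        exact out_eq name 4 (by omega) hk4 _ _ (by decide) (by norm_num)
    · by_cases hP : ("png" : String).toList <:+ low.toList
      · have hW : ¬ ("webp" : String).toList <:+ low.toList :=
          fun h => sfx_absurd hP h (by decide) (by decide)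
        have hDJ : ¬ (".jpg" : String).toList <:+ low.toList := fun h => hJ (sfx_trans_dot h)
        have hDE : ¬ (".jpeg" : String).toList <:+ low.toList := fun h => hE (sfx_trans_dot h)
        have hDW : ¬ (".webp" : String).toList <:+ low.toList := fun h => hW (sfx_trans_dot h)
        have hm4 : PySem.Str.slice low (some (PySem.Str.len low - ((4:Nat) : Int))) none ∉ ["jpeg", "webp"] :=
          notmem2 (fun h => hE ((tail_eq_iff (by decide)).mp h))
                  (fun h => hW ((tail_eq_iff (by decide)).mp h))
        have hm3 : PySem.Str.slice low (some (PySem.Str.len low - ((3:Nat) : Int))) none ∈ ["jpg", "png"] :=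
          mem2_of' ((tail_eq_iff (by decide)).mpr hP)
        have hk3 : 3 ≤ name.toList.length := by
          have h1 := hP.length_le
          have h2 : ("png" : String).toList.length = 3 := by decide
          omega
        by_cases hD : (".png" : String).toList <:+ low.toList
        · have hdc : PySem.Str.endswith (PySem.Str.slice low none (some (PySem.Str.len low - ((3:Nat) : Int)))) "." = true :=
            (dotcond_iff (by decide) hP).mpr hD
          have hk4 : 4 ≤ name.toList.length := by
            have h1 := hD.length_le
            have h2 : (".png" : String).toList.length = 4 := by decide
            omega
          simp only [pvLoops, pvLoopDotted, ew_true hD, ew_false hDJ, ew_false hDE, if_true]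
          simp only [pvAltLoop, if_neg hm4, if_pos hm3, hdc, if_true]
          exact out_eq name 4 (by omega) hk4 _ _ (by decide) (by norm_num)
        · have hdc : PySem.Str.endswith (PySem.Str.slice low none (some (PySem.Str.len low - ((3:Nat) : Int)))) "." = false :=
            Bool.eq_false_iff.mpr (fun hx => hD ((dotcond_iff (by decide) hP).mp hx))
          simp only [pvLoops, pvLoopDotted, pvLoopBare, ew_false hD, ew_false hDJ, ew_false hDE,
            ew_false hDW, ew_false hJ, ew_false hE, capp3, ew_true hP, Bool.not_false,
            Bool.false_and, Bool.and_self, if_true]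
          simp only [pvAltLoop, if_neg hm4, if_pos hm3, hdc]
          exact out_eq name 3 (by omega) hk3 _ _ (by decide) (by norm_num)
      · by_cases hW : ("webp" : String).toList <:+ low.toList
        · have hDJ : ¬ (".jpg" : String).toList <:+ low.toList := fun h => hJ (sfx_trans_dot h)
          have hDE : ¬ (".jpeg" : String).toList <:+ low.toList := fun h => hE (sfx_trans_dot h)
          have hDP : ¬ (".png" : String).toList <:+ low.toList := fun h => hP (sfx_trans_dot h)
          have hm4 : PySem.Str.slice low (some (PySem.Str.len low - ((4:Nat) : Int))) none ∈ ["jpeg", "webp"] :=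
            mem2_of' ((tail_eq_iff (by decide)).mpr hW)
          have hk4 : 4 ≤ name.toList.length := by
            have h1 := hW.length_le
            have h2 : ("webp" : String).toList.length = 4 := by decide
            omega
          by_cases hD : (".webp" : String).toList <:+ low.toList
          · have hdc : PySem.Str.endswith (PySem.Str.slice low none (some (PySem.Str.len low - ((4:Nat) : Int)))) "." = true :=
              (dotcond_iff (by decide) hW).mpr hD
            have hk5 : 5 ≤ name.toList.length := by
              have h1 := hD.length_le
              have h2 : (".webp" : String).toList.length = 5 := by decide
              omega
            simp only [pvLoops, pvLoopDotted, ew_true hD, ew_false hDJ, ew_false hDE, ew_false hDP,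
              if_true]
            simp only [pvAltLoop, if_pos hm4, hdc, if_true]
            exact out_eq name 5 (by omega) hk5 _ _ (by decide) (by norm_num)
          · have hdc : PySem.Str.endswith (PySem.Str.slice low none (some (PySem.Str.len low - ((4:Nat) : Int)))) "." = false :=
              Bool.eq_false_iff.mpr (fun hx => hD ((dotcond_iff (by decide) hW).mp hx))
            simp only [pvLoops, pvLoopDotted, pvLoopBare, ew_false hD, ew_false hDJ, ew_false hDE,
              ew_false hDP, ew_false hJ, ew_false hE, ew_false hP, capp4, ew_true hW,
              Bool.not_false, Bool.false_and, Bool.and_self, if_true]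
            simp only [pvAltLoop, if_pos hm4, hdc]
            exact out_eq name 4 (by omega) hk4 _ _ (by decide) (by norm_num)
        · -- no extension matches: both sides return name unchanged
          have hDJ : ¬ (".jpg" : String).toList <:+ low.toList := fun h => hJ (sfx_trans_dot h)
          have hDE : ¬ (".jpeg" : String).toList <:+ low.toList := fun h => hE (sfx_trans_dot h)
          have hDP : ¬ (".png" : String).toList <:+ low.toList := fun h => hP (sfx_trans_dot h)
          have hDW : ¬ (".webp" : String).toList <:+ low.toList := fun h => hW (sfx_trans_dot h)
          have hm4 : PySem.Str.slice low (some (PySem.Str.len low - ((4:Nat) : Int))) none ∉ ["jpeg", "webp"] :=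
            notmem2 (fun h => hE ((tail_eq_iff (by decide)).mp h))
                    (fun h => hW ((tail_eq_iff (by decide)).mp h))
          have hm3 : PySem.Str.slice low (some (PySem.Str.len low - ((3:Nat) : Int))) none ∉ ["jpg", "png"] :=
            notmem2 (fun h => hJ ((tail_eq_iff (by decide)).mp h))
                    (fun h => hP ((tail_eq_iff (by decide)).mp h))
          simp only [pvLoops, pvLoopDotted, pvLoopBare, ew_false hDJ, ew_false hDE, ew_false hDP,
            ew_false hDW, ew_false hJ, ew_false hE, ew_false hP, ew_false hW,
            Bool.false_and]
          simp only [pvAltLoop, if_neg hm4, if_neg hm3]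
          simp

-- ===== VERDICT (by name: the statement is the Claim_ definition above) =====
theorem strip_weird_img_suffix_py_spec : Claim_equal_strip_weird_img_suffix_py := by
  intro filename _
  unfold Spec_strip_weird_img_suffix_py strip_weird_img_suffix_py strip_weird_img_suffix_py_alt
  exact main_eq _ _ (by simp [PySem.Str.toList_lower, PySem.Chars.lower])
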